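-- pv_equiv track=rewrite | github.com/chrishayuk/chuk-mlx | src/chuk_lazarus/data/tokenizers/special_tokens.py | strip_padding
-- ===== SOURCE A (Python) =====
-- def strip_padding(
--     token_ids: list[int],
--     pad_token_id: int,
--     from_left: bool = False,
-- ) -> list[int]:
--     """
--     Remove padding tokens from a sequence.
--
--     Args:
--         token_ids: List of token IDs
--         pad_token_id: Padding token ID
--         from_left: If True, remove from left; else from right
--
--     Returns:
--         Token IDs with padding removed
--     """
--     if not token_ids:
--         return []
--
--     if from_left:
--         start_idx = 0
--         while start_idx < len(token_ids) and token_ids[start_idx] == pad_token_id: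
--             start_idx += 1
--         return token_ids[start_idx:]
--     else:
--         end_idx = len(token_ids)
--         while end_idx > 0 and token_ids[end_idx - 1] == pad_token_id:
--             end_idx -= 1
--         return token_ids[:end_idx]
-- ===== SOURCE B (Python) =====
-- def strip_padding(
--     token_ids: list[int],
--     pad_token_id: int,
--     from_left: bool = False,
-- ) -> list[int]:
--     """Single forward streaming pass with an accumulator: a 'started' flag
--     suppresses leading pads (from_left), or a pending-pad buffer delays pads
--     until a later non-pad token proves they are interior (from_right)."""
--     out = []
--     if from_left:
--         started = False
--         for t in token_ids:
--             if started or t != pad_token_id: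
--                 started = True
--                 out.append(t)
--     else:
--         pending = 0
--         for t in token_ids:
--             if t == pad_token_id:
--                 pending += 1
--             else:
--                 out.extend([pad_token_id] * pending)
--                 pending = 0
--                 out.append(t)
--     return out
-- ===== Notes on version B (the rewrite author's own statement) =====
-- stated objective: alternative
-- what changed: A walks an index from one end until the first non-pad and slices; B never indexes or slices: it streams the whole list once left-to-right building a fresh output, using a started-flag to suppress leading pads or a pending-pad counter that buffers pads and only flushes them when a later non-pad token shows they are interior.
import Mathlib
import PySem

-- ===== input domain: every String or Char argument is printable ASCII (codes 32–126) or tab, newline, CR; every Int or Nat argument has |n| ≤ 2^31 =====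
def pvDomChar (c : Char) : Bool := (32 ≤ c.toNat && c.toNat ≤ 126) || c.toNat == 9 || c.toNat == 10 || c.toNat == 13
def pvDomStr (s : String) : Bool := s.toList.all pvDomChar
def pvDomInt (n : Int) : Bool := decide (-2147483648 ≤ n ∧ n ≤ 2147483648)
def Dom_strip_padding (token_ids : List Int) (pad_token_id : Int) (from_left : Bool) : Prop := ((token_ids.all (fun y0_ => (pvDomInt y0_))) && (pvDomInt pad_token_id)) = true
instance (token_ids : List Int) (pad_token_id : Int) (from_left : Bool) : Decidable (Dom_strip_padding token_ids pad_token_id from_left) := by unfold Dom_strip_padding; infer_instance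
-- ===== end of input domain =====

-- B replaces A's end-indexed walk-and-slice with a single left-to-right streaming pass building a fresh output (started-flag / pending-pad counter); alternative decomposition, same return value.


-- ===== PORT A =====
-- while start_idx < len(token_ids) and token_ids[start_idx] == pad_token_id: start_idx += 1
def stripA_left (xs : List Int) (pad : Int) (i : Nat) : Nat :=
  if i < xs.length ∧ xs.getD i 0 = pad then stripA_left xs pad (i + 1) else i
termination_by xs.length - i
decreasing_by omega

-- while end_idx > 0 and token_ids[end_idx - 1] == pad_token_id: end_idx -= 1
def stripA_right (xs : List Int) (pad : Int) (e : Nat) : Nat :=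
  if 0 < e ∧ xs.getD (e - 1) 0 = pad then stripA_right xs pad (e - 1) else e
termination_by e

def strip_padding (token_ids : List Int) (pad_token_id : Int) (from_left : Bool) : List Int :=
  if token_ids = [] then []
  else if from_left then
    PySem.List.slice token_ids (some ((stripA_left token_ids pad_token_id 0 : Nat) : Int)) none
  else
    PySem.List.slice token_ids none (some ((stripA_right token_ids pad_token_id token_ids.length : Nat) : Int))

-- ===== PORT B =====
-- for t in token_ids: if started or t != pad: started = True; out.append(t)
def stripB_leftStep (pad : Int) (s : Bool × List Int) (t : Int) : Bool × List Int :=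
  if s.1 || !(t == pad) then (true, s.2 ++ [t]) else s

-- for t in token_ids: if t == pad: pending += 1 else: out += [pad]*pending + [t]; pending = 0
def stripB_rightStep (pad : Int) (s : Nat × List Int) (t : Int) : Nat × List Int :=
  if t == pad then (s.1 + 1, s.2) else (0, s.2 ++ List.replicate s.1 pad ++ [t])

def strip_padding_alt (token_ids : List Int) (pad_token_id : Int) (from_left : Bool) : List Int :=
  if from_left then
    (token_ids.foldl (stripB_leftStep pad_token_id) (false, [])).2
  else
    (token_ids.foldl (stripB_rightStep pad_token_id) (0, [])).2

-- ===== PRECONDITION & SPEC =====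
def Spec_strip_padding (token_ids : List Int) (pad_token_id : Int) (from_left : Bool) (out : List Int) : Prop := out = strip_padding_alt token_ids pad_token_id from_left
instance (token_ids : List Int) (pad_token_id : Int) (from_left : Bool) (out : List Int) : Decidable (Spec_strip_padding token_ids pad_token_id from_left out) := by unfold Spec_strip_padding; infer_instance

-- ===== CLAIM (what is proved, stated in full; the proofs are below) =====
def Claim_equal_strip_padding : Prop := ∀ (token_ids : List Int) (pad_token_id : Int) (from_left : Bool), Dom_strip_padding token_ids pad_token_id from_left → Spec_strip_padding token_ids pad_token_id from_left (strip_padding token_ids pad_token_id from_left)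

-- ===== LEMMAS AND PROOFS =====

-- A's left while-loop drops exactly the leading pads
lemma dropA_left (xs : List Int) (pad : Int) :
    ∀ i, i ≤ xs.length →
      xs.drop (stripA_left xs pad i) = (xs.drop i).dropWhile (fun x => x == pad) := by
  intro i hi
  induction hn : xs.length - i generalizing i with
  | zero =>
    have hle : xs.length = i := by omega
    rw [stripA_left]
    simp only [hle, lt_self_iff_false, false_and, if_false]
    rw [← hle, List.drop_length, List.dropWhile_nil]
  | succ n ih =>
    have hlt : i < xs.length := by omega
    rw [stripA_left]
    by_cases hp : xs.getD i 0 = pad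
    · simp only [hlt, hp, and_self, if_true]
      rw [ih (i + 1) (by omega) (by omega)]
      rw [List.drop_eq_getElem_cons hlt, List.dropWhile_cons]
      have : xs[i] = pad := by
        have := List.getD_eq_getElem xs 0 hlt
        omega
      simp [this]
    · simp only [hlt, hp, and_false, if_false]
      rw [List.drop_eq_getElem_cons hlt, List.dropWhile_cons]
      have : xs[i] ≠ pad := by
        have := List.getD_eq_getElem xs 0 hlt
        omega
      simp [this]

-- A's right while-loop keeps exactly the prefix before the trailing pads
lemma takeA_right (xs : List Int) (pad : Int) :
    ∀ e, e ≤ xs.length →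
      xs.take (stripA_right xs pad e) = (xs.take e).rdropWhile (fun x => x == pad) := by
  intro e
  induction e with
  | zero => intro _; rw [stripA_right]; simp [List.rdropWhile]
  | succ e ih =>
    intro hle
    have hlt : e < xs.length := by omega
    have htk : xs.take (e + 1) = xs.take e ++ [xs[e]] := by
      rw [List.take_add_one]
      simp [List.getElem?_eq_getElem hlt]
    rw [stripA_right]
    by_cases hp : xs.getD e 0 = pad
    · simp only [Nat.zero_lt_succ, Nat.add_sub_cancel, hp, and_self, if_true]
      rw [ih (by omega), htk, List.rdropWhile_concat_pos]
      have : xs[e] = pad := by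
        have := List.getD_eq_getElem xs 0 hlt
        omega
      simp [this]
    · simp only [Nat.zero_lt_succ, Nat.add_sub_cancel, hp, and_false, if_false]
      rw [htk, List.rdropWhile_concat_neg]
      have : xs[e] ≠ pad := by
        have := List.getD_eq_getElem xs 0 hlt
        omega
      simp [this]

-- once started, B's left fold appends everything
lemma foldB_left_started (pad : Int) (out : List Int) :
    ∀ xs, (List.foldl (stripB_leftStep pad) (true, out) xs) = (true, out ++ xs) := by
  intro xs
  induction xs generalizing out with
  | nil => simp
  | cons t xs ih => simp [stripB_leftStep, ih]

-- B's left fold computes dropWhile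
lemma foldB_left (pad : Int) :
    ∀ xs : List Int, (List.foldl (stripB_leftStep pad) (false, []) xs).2
      = xs.dropWhile (fun x => x == pad) := by
  intro xs
  induction xs with
  | nil => simp
  | cons t xs ih =>
    by_cases hp : t = pad
    · simp [stripB_leftStep, hp, ih]
    · simp [stripB_leftStep, hp, foldB_left_started]

-- rdropWhile past a failing element
lemma rdropWhile_append_cons (q : Int → Bool) (l1 : List Int) (x : Int) (l2 : List Int)
    (hx : q x = false) :
    (l1 ++ x :: l2).rdropWhile q = l1 ++ x :: l2.rdropWhile q := by
  unfold List.rdropWhile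
  rw [show (l1 ++ x :: l2).reverse = l2.reverse ++ x :: l1.reverse by simp]
  rw [List.dropWhile_append]
  by_cases h : (List.dropWhile q l2.reverse).isEmpty
  · simp_all
  · simp_all

-- B's right fold invariant: result = out ++ rdropWhile (pending pads ++ rest)
lemma foldB_right_inv (pad : Int) :
    ∀ (xs : List Int) (p : Nat) (out : List Int),
      (List.foldl (stripB_rightStep pad) (p, out) xs).2
        = out ++ (List.replicate p pad ++ xs).rdropWhile (fun x => x == pad) := by
  intro xs
  induction xs with
  | nil =>
    intro p out
    simp [List.rdropWhile]
  | cons t xs ih =>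
    intro p out
    by_cases hp : t = pad
    · have : List.replicate p pad ++ t :: xs = List.replicate (p + 1) pad ++ xs := by
        subst hp
        simp [List.replicate_succ', List.append_assoc]
      rw [this]
      simp only [stripB_rightStep, List.foldl_cons, hp, beq_self_eq_true, if_true]
      exact ih (p + 1) out
    · simp only [stripB_rightStep, List.foldl_cons, beq_iff_eq, hp, if_false]
      rw [ih 0 (out ++ List.replicate p pad ++ [t])]
      rw [rdropWhile_append_cons _ _ _ _ (by simp [hp])]
      simp

-- ===== VERDICT (by name: the statement is the Claim_ definition above) =====
theorem strip_padding_spec : Claim_equal_strip_padding := by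
  intro xs pad fl _
  unfold Spec_strip_padding strip_padding strip_padding_alt
  by_cases hnil : xs = []
  · subst hnil; cases fl <;> simp
  · simp only [hnil, if_false]
    cases fl
    · simp only [if_false, Bool.false_eq_true,
        PySem.List.slice_to_natCast]
      rw [takeA_right xs pad xs.length le_rfl, List.take_length,
        foldB_right_inv pad xs 0 []]
      simp
    · simp only [if_true, PySem.List.slice_from_natCast]
      rw [dropA_left xs pad 0 (Nat.zero_le _), List.drop_zero, foldB_left]
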